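-- pv_equiv track=rewrite | github.com/eddyyxxyy/guppe | exercicios/secao08/ex23.py | side_triangle
-- ===== SOURCE A (Python) =====
-- def side_triangle(width: int):
--     upper_part = []
--     result_string = ''
--     for i in range(1, width + 1):
--         upper_part.append('*' * i)
--     complete_triangle = upper_part + upper_part[-2::-1]
--     for piece in complete_triangle:
--         result_string += piece + '\n'
--     return result_string
-- ===== SOURCE B (Python) =====
-- def side_triangle(width: int):
--     rows = ['*' * (width - abs(r - width)) for r in range(1, 2 * width)]
--     return '\n'.join(rows) + '\n' if rows else ''
-- ===== Notes on version B (the rewrite author's own statement) =====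
-- stated objective: simpler
-- what changed: Iterates once over all rows, computing each row's star count directly from the symmetry formula width - abs(r - width), and joins the rows with newline, instead of building the upper half as a list, mirroring it with a reverse slice, and concatenating strings in a second loop.
import Mathlib
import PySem

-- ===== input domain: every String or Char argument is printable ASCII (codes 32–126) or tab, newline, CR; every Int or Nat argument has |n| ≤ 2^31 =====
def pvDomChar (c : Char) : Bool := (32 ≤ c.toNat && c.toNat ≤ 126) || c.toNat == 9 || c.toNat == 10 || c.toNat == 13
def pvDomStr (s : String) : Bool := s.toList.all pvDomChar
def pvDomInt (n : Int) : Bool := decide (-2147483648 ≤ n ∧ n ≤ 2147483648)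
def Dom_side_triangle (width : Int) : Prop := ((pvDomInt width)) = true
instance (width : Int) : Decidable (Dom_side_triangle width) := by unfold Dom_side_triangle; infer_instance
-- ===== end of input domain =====

-- B builds each row's star count from the symmetry formula width - |r - width| over one range
-- and joins the rows, instead of A's mirrored-list construction; same return value, no speed claim.

-- ===== PORT A =====
def side_triangle (width : Int) : String :=
  let upper_part : List (List Char) :=
    (PySem.List.pyRange 1 (width + 1) 1).foldl
      (fun acc i => acc ++ [PySem.List.pyRepeat ['*'] i]) []
  let complete_triangle : List (List Char) :=
    upper_part ++ (PySem.List.slice? upper_part (some (-2)) none (-1)).getD []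
  let result_string : String :=
    complete_triangle.foldl (fun acc piece => acc ++ String.ofList (piece ++ ['\n'])) ""
  result_string

-- ===== PORT B =====
def side_triangle_alt (width : Int) : String :=
  let rows : List (List Char) :=
    (PySem.List.pyRange 1 (2 * width) 1).map
      (fun r => PySem.List.pyRepeat ['*'] (width - |r - width|))
  if rows = [] then "" else String.ofList (PySem.Chars.join ['\n'] rows ++ ['\n'])

-- ===== PRECONDITION & SPEC =====
def Spec_side_triangle (width : Int) (out : String) : Prop := out = side_triangle_alt width
instance (width : Int) (out : String) : Decidable (Spec_side_triangle width out) := by unfold Spec_side_triangle; infer_instance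

-- ===== CLAIM (what is proved, stated in full; the proofs are below) =====
def Claim_equal_side_triangle : Prop := ∀ (width : Int), Dom_side_triangle width → Spec_side_triangle width (side_triangle width)

-- ===== LEMMAS AND PROOFS =====

-- the common shape of both row lists for positive width
def upRows (m : Nat) : List (List Char) :=
  (List.range m).map (fun k => List.replicate (k + 1) '*')

-- appending singletons in a foldl is a map
theorem foldl_append_singleton {α β : Type} (f : α → β) (l : List α) (acc : List β) :
    l.foldl (fun a i => a ++ [f i]) acc = acc ++ l.map f := by
  induction l generalizing acc with
  | nil => simp
  | cons x xs ih => simp [List.foldl_cons, ih, List.append_assoc]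

-- A's concatenation loop is flatten of rows-with-newline
theorem foldl_concat_nl (l : List (List Char)) (acc : String) :
    l.foldl (fun a p => a ++ String.ofList (p ++ ['\n'])) acc
      = acc ++ String.ofList ((l.map (· ++ ['\n'])).flatten) := by
  induction l generalizing acc with
  | nil => simp
  | cons x xs ih =>
    rw [List.foldl_cons, ih]
    simp [String.append_assoc, ← String.ofList_append]

-- join with '\n' plus a trailing newline is the same flatten (nonempty list)
theorem join_nl (l : List (List Char)) (h : l ≠ []) :
    PySem.Chars.join ['\n'] l ++ ['\n'] = (l.map (· ++ ['\n'])).flatten := by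
  induction l with
  | nil => exact absurd rfl h
  | cons x xs ih =>
    cases xs with
    | nil => simp [PySem.Chars.join_singleton]
    | cons y ys =>
      rw [PySem.Chars.join_cons_cons]
      simp only [List.map_cons, List.flatten_cons]
      rw [List.append_assoc, List.append_assoc, ih (by simp)]
      simp [List.append_assoc]

-- xs[-2::-1] = reverse of dropLast
theorem slice_aux {α : Type} [Inhabited α] (xs : List α) (h2 : 2 ≤ xs.length) :
    (List.range (if 1 < xs.length then (max (-2 + (xs.length:Int)) (-1) + 1).toNat else 0)).filterMap
      (fun (x : Nat) => xs[(max (-2 + (xs.length:Int)) (-1) + -(x:Int)).toNat]?) = xs.dropLast.reverse := by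
  have hmax : max (-2 + (xs.length:Int)) (-1) = (xs.length:Int) - 2 := by
    rw [max_eq_left (by omega)]; ring
  rw [hmax]
  have hcnt : (if 1 < xs.length then ((xs.length:Int) - 2 + 1).toNat else 0) = xs.length - 1 := by
    rw [if_pos (by omega)]; omega
  rw [hcnt]
  have hfm : ∀ k ∈ List.range (xs.length - 1),
      xs[((xs.length:Int) - 2 + -((k:Nat):Int)).toNat]? =
      (some ∘ fun k => xs.dropLast.reverse.getD k default) k := by
    intro k hk
    simp only [List.mem_range] at hk
    have hidx : ((xs.length:Int) - 2 + -(k:Int)).toNat = xs.length - 2 - k := by omega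
    rw [hidx]
    have h1 : xs.length - 2 - k < xs.length := by omega
    have h3 : k < xs.dropLast.reverse.length := by simp; omega
    rw [List.getElem?_eq_getElem h1]
    simp only [Function.comp_apply]
    congr 1
    rw [List.getD_eq_getElem _ _ h3]
    rw [List.getElem_reverse, List.getElem_dropLast]
    congr 1
    simp only [List.length_dropLast]
    omega
  rw [List.filterMap_congr hfm, List.filterMap_eq_map]
  apply List.ext_getElem
  · simp
  · intro i hi1 hi2
    rw [List.getElem_map, List.getElem_range]
    exact List.getD_eq_getElem _ _ hi2

theorem slice_neg2_rev {α : Type} [Inhabited α] (xs : List α) :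
    PySem.List.slice? xs (some (-2)) none (-1) = some xs.dropLast.reverse := by
  have hd : PySem.List.slice? xs (some (-2)) none (-1) =
      some ((List.range (if 1 < xs.length then (max (-2 + (xs.length:Int)) (-1) + 1).toNat else 0)).filterMap
            (fun (x : Nat) => xs[(max (-2 + (xs.length:Int)) (-1) + -(x:Int)).toNat]?)) := by
    simp [PySem.List.slice?, PySem.List.sliceIndices]
  rw [hd]
  rcases xs with _ | ⟨a, _ | ⟨b, t⟩⟩
  · simp
  · simp
  · exact congrArg some (slice_aux _ (by simp))

-- A's upper_part is upRows
theorem upper_eq (m : Nat) :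
    (PySem.List.pyRange 1 ((m : Int) + 1) 1).foldl
      (fun acc i => acc ++ [PySem.List.pyRepeat ['*'] i]) [] = upRows m := by
  rw [foldl_append_singleton, PySem.List.pyRange_one]
  have h1 : ((m:Int) + 1 - 1).toNat = m := by omega
  rw [h1, List.map_map, List.nil_append]
  unfold upRows
  apply List.map_congr_left
  intro k hk
  simp only [Function.comp_apply]
  rw [PySem.List.pyRepeat_singleton]
  congr 1
  omega

-- B's row list equals A's mirrored list for m ≥ 1
theorem rows_eq (m : Nat) (hm : 1 ≤ m) :
    (PySem.List.pyRange 1 (2 * (m : Int)) 1).map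
      (fun r => PySem.List.pyRepeat ['*'] ((m : Int) - |r - (m : Int)|)) =
    upRows m ++ (upRows m).dropLast.reverse := by
  obtain ⟨n, rfl⟩ : ∃ n, m = n + 1 := ⟨m - 1, by omega⟩
  have hc : ((n + 1 : Nat) : Int) = (n : Int) + 1 := by push_cast; ring
  rw [hc]
  rw [PySem.List.pyRange_one_append 1 ((n:Int) + 2) (2 * ((n:Int) + 1)) (by omega) (by omega),
      List.map_append]
  have hdrop : (upRows (n + 1)).dropLast = upRows n := by
    unfold upRows
    rw [List.range_succ, List.map_append]
    simp
  congr 1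
  · rw [PySem.List.pyRange_one]
    have h1 : ((n:Int) + 2 - 1).toNat = n + 1 := by omega
    rw [h1, List.map_map]
    unfold upRows
    apply List.map_congr_left
    intro k hk
    simp only [List.mem_range] at hk
    simp only [Function.comp_apply]
    rw [abs_of_nonpos (by omega), PySem.List.pyRepeat_singleton]
    congr 1
    omega
  · rw [hdrop]
    apply List.ext_getElem
    · simp only [upRows, List.length_map, List.length_reverse, List.length_range,
        PySem.List.length_pyRange_one]
      omega
    · intro i hi1 hi2
      rw [List.getElem_map, PySem.List.getElem_pyRange_one, List.getElem_reverse]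
      unfold upRows
      rw [List.getElem_map, List.getElem_range]
      have hlen : (upRows n).length = n := by simp [upRows]
      simp only [upRows] at hi2
      rw [abs_of_nonneg (by omega), PySem.List.pyRepeat_singleton]
      simp only [List.length_map, List.length_range, List.length_reverse,
        PySem.List.length_pyRange_one] at hi1 hi2 ⊢
      congr 1
      omega

-- ===== VERDICT (by name: the statement is the Claim_ definition above) =====
theorem side_triangle_spec : Claim_equal_side_triangle := by
  intro width _
  unfold Spec_side_triangle side_triangle side_triangle_alt
  by_cases h : width ≤ 0
  · rw [PySem.List.pyRange_one_eq_nil (by omega), PySem.List.pyRange_one_eq_nil (by omega)]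
    simp [slice_neg2_rev]
  · obtain ⟨m, rfl⟩ : ∃ m : Nat, width = (m : Int) := ⟨width.toNat, by omega⟩
    have hm : 1 ≤ m := by omega
    rw [upper_eq, rows_eq m hm]
    dsimp only
    rw [slice_neg2_rev]
    have hne : upRows m ++ (upRows m).dropLast.reverse ≠ [] := by
      simp [upRows]
      omega
    rw [if_neg hne]
    simp only [Option.getD_some]
    rw [foldl_concat_nl, ← join_nl _ hne]
    simp
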